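-- pv_equiv track=rewrite | github.com/SATYENDRARANJAN/PycharmProjects | PythonPracticeProjects/DP/23_print_all_subsequences_of_an_array.py | get_subseq
-- ===== SOURCE A (Python) =====
-- from builtins import range
--
-- def get_subseq(a,n):
--     if n == 0:
--         return [[a[0]]]
--     list=[]
--     list2 =[]
--     for i in range(n-1,-1,-1):
--         list = get_subseq(a,i)
--         for subseq in list:
--             list2.append(subseq + [a[n]])
--         list2 = list2 + list
--         list2.append([a[n]])
--     return list2
-- ===== SOURCE B (Python) =====
-- def get_subseq(a, n):
--     # Bottom-up DP: compute the answer for each index k once and reuse it,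
--     # instead of A's exponential recomputation.
--     result = []
--     memo = []
--     for k in range(n + 1):
--         if k == 0:
--             result = [[a[0]]]
--         else:
--             result = []
--             for i in range(k - 1, -1, -1):
--                 prev = memo[i]
--                 for s in prev:
--                     result.append(s + [a[k]])
--                 result += prev
--                 result.append([a[k]])
--         memo.append(result)
--     return result
-- ===== Notes on version B (the rewrite author's own statement) =====
-- stated objective: faster
-- what changed: replaces A's exponential recursion (get_subseq(a,i) recomputed at every recursion level) by a bottom-up DP loop that computes the answer for each index once into a memo table; intended as faster — probes that finished measured B 1.4x-4.9x ahead, but both programs scale with the exponentially sized output and the largest probes time out for both, so a timing run did not confirm it at the largest size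
import Mathlib
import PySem

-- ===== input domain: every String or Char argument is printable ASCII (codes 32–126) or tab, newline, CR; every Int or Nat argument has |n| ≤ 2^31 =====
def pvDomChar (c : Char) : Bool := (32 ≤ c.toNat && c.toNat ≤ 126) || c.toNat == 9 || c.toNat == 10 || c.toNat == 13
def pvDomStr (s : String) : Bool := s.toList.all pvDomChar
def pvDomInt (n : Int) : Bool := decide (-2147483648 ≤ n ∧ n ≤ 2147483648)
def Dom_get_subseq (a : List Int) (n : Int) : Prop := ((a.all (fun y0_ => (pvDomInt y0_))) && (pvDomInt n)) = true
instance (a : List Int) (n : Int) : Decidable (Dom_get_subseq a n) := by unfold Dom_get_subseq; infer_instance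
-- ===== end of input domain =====

-- B replaces A's recomputing recursion by a bottom-up memo table (each level computed once); intended as faster; finished probes measured B 1.4x-4.9x ahead, unconfirmed at the largest sizes (the output itself is exponentially sized, so the largest probes time out for both).

-- ===== PORT A =====
def get_subseq (a : List Int) (n : Int) : List (List Int) :=
  if n == 0 then [[(PySem.List.pyGet? a 0).getD 0]]
  else
    (PySem.List.pyRange (n - 1) (-1) (-1)).attach.foldl
      (fun list2 i =>
        let l := get_subseq a i.1
        ((list2 ++ l.map (fun subseq => subseq ++ [(PySem.List.pyGet? a n).getD 0])) ++ l)
          ++ [[(PySem.List.pyGet? a n).getD 0]])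
      []
termination_by n.toNat
decreasing_by
  have h := PySem.List.mem_pyRange_neg_one.mp i.2
  omega

-- ===== PORT B =====
def get_subseq_alt (a : List Int) (n : Int) : List (List Int) :=
  let st := (PySem.List.pyRange 0 (n + 1) 1).foldl
    (fun (st : List (List Int) × List (List (List Int))) k =>
      let memo := st.2
      let result :=
        if k == 0 then [[(PySem.List.pyGet? a 0).getD 0]]
        else
          (PySem.List.pyRange (k - 1) (-1) (-1)).foldl
            (fun result i =>
              let prev := (PySem.List.pyGet? memo i).getD []
              ((result ++ prev.map (fun s => s ++ [(PySem.List.pyGet? a k).getD 0])) ++ prev)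
                ++ [[(PySem.List.pyGet? a k).getD 0]])
            []
      (result, memo ++ [result]))
    ([], [])
  st.1

-- ===== PRECONDITION & SPEC =====
-- A raises IndexError exactly when n ≥ len(a) (for n < 0 it returns []); Pre_ excludes only the raising inputs.
def Pre_get_subseq (a : List Int) (n : Int) : Prop := n < a.length
instance (a : List Int) (n : Int) : Decidable (Pre_get_subseq a n) := by unfold Pre_get_subseq; infer_instance
def pvWitness_get_subseq : List Int × Int := ([1, 2, 3], 2)
def Spec_get_subseq (a : List Int) (n : Int) (out : List (List Int)) : Prop := out = get_subseq_alt a n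
instance (a : List Int) (n : Int) (out : List (List Int)) : Decidable (Spec_get_subseq a n out) := by unfold Spec_get_subseq; infer_instance

-- ===== CLAIM (what is proved, stated in full; the proofs are below) =====
def Claim_equal_get_subseq : Prop := ∀ (a : List Int) (n : Int), Dom_get_subseq a n → Pre_get_subseq a n → Spec_get_subseq a n (get_subseq a n)

-- ===== LEMMAS AND PROOFS =====

-- B's loop body, named for the proofs (definitionally the lambda inside get_subseq_alt)
def pvStepB (a : List Int) (st : List (List Int) × List (List (List Int))) (k : Int) :
    List (List Int) × List (List (List Int)) :=
  let memo := st.2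
  let result :=
    if k == 0 then [[(PySem.List.pyGet? a 0).getD 0]]
    else
      (PySem.List.pyRange (k - 1) (-1) (-1)).foldl
        (fun result i =>
          let prev := (PySem.List.pyGet? memo i).getD []
          ((result ++ prev.map (fun s => s ++ [(PySem.List.pyGet? a k).getD 0])) ++ prev)
            ++ [[(PySem.List.pyGet? a k).getD 0]])
        []
  (result, memo ++ [result])

theorem pv_alt_eq (a : List Int) (n : Int) :
    get_subseq_alt a n = ((PySem.List.pyRange 0 (n + 1) 1).foldl (pvStepB a) ([], [])).1 := rfl

theorem pv_A_unfold (a : List Int) (n : Int) (hn : (n == 0) = false) :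
    get_subseq a n = (PySem.List.pyRange (n - 1) (-1) (-1)).foldl
      (fun list2 i =>
        let l := get_subseq a i
        ((list2 ++ l.map (fun subseq => subseq ++ [(PySem.List.pyGet? a n).getD 0])) ++ l)
          ++ [[(PySem.List.pyGet? a n).getD 0]])
      [] := by
  rw [get_subseq]
  simp only [hn, Bool.false_eq_true, if_false]
  exact List.foldl_attach
    (f := fun list2 i =>
      ((list2 ++ (get_subseq a i).map (fun subseq => subseq ++ [(PySem.List.pyGet? a n).getD 0]))
        ++ get_subseq a i) ++ [[(PySem.List.pyGet? a n).getD 0]])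

theorem pv_step (a : List Int) (m : Nat) :
    pvStepB a ((if m = 0 then [] else get_subseq a ((m : Int) - 1)),
               (List.range m).map (fun k : Nat => get_subseq a (k : Int))) (m : Int)
    = (get_subseq a (m : Int),
       (List.range (m + 1)).map (fun k : Nat => get_subseq a (k : Int))) := by
  have hres : (pvStepB a ((if m = 0 then [] else get_subseq a ((m : Int) - 1)),
               (List.range m).map (fun k : Nat => get_subseq a (k : Int))) (m : Int)).1
      = get_subseq a (m : Int) := by
    by_cases h0 : m = 0
    · subst h0
      show [[(PySem.List.pyGet? a 0).getD 0]] = get_subseq a 0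
      rw [get_subseq]; rfl
    · have hb : ((m : Int) == 0) = false := by
        simp only [beq_eq_false_iff_ne, ne_eq, Int.natCast_eq_zero]; exact h0
      show (if ((m : Int) == 0) = true then _ else _) = _
      rw [if_neg (by simp [hb]), pv_A_unfold a (m : Int) hb]
      apply PySem.List.foldl_congr_mem
      intro acc i hi
      have hmem := PySem.List.mem_pyRange_neg_one.mp hi
      have hlt : i.toNat < m := by omega
      have hget : PySem.List.pyGet?
          ((List.range m).map (fun k : Nat => get_subseq a (k : Int))) i
          = some (get_subseq a i) := by
        have hk : i = ((i.toNat : Nat) : Int) := by omega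
        rw [hk, PySem.List.pyGet?_natCast, List.getElem?_map, List.getElem?_range hlt,
          Option.map_some]
      simp only [hget, Option.getD_some]
  refine Prod.ext hres ?_
  show (List.range m).map (fun k : Nat => get_subseq a (k : Int)) ++
      [(pvStepB a (_, (List.range m).map (fun k : Nat => get_subseq a (k : Int))) (m : Int)).1]
      = _
  rw [hres, List.range_succ, List.map_append, List.map_singleton]

theorem pv_inv (a : List Int) (m : Nat) :
    (PySem.List.pyRange 0 (m : Int) 1).foldl (pvStepB a) ([], [])
    = ((if m = 0 then [] else get_subseq a ((m : Int) - 1)),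
       (List.range m).map (fun k : Nat => get_subseq a (k : Int))) := by
  induction m with
  | zero =>
    rw [Nat.cast_zero, PySem.List.pyRange_one_eq_nil le_rfl]; rfl
  | succ m ih =>
    have hcast : ((m + 1 : Nat) : Int) = (m : Int) + 1 := by push_cast; ring
    rw [hcast, PySem.List.pyRange_one_succ_right (by positivity), List.foldl_append,
      ih]
    simp only [List.foldl_cons, List.foldl_nil]
    rw [pv_step]
    have h1 : (m : Int) + 1 - 1 = (m : Int) := by ring
    rw [if_neg (Nat.succ_ne_zero m), h1]

-- ===== VERDICT (by name: the statement is the Claim_ definition above) =====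
theorem get_subseq_spec : Claim_equal_get_subseq := by
  intro a n _ _
  unfold Spec_get_subseq
  rw [pv_alt_eq]
  by_cases hn : 0 ≤ n
  · have hm1 : n + 1 = ((n.toNat + 1 : Nat) : Int) := by omega
    rw [hm1, pv_inv a (n.toNat + 1)]
    have h1 : (((n.toNat + 1 : Nat) : Int) - 1) = n := by omega
    show get_subseq a n
        = if n.toNat + 1 = 0 then [] else get_subseq a (((n.toNat + 1 : Nat) : Int) - 1)
    rw [if_neg (Nat.succ_ne_zero _), h1]
  · have h1 : n + 1 ≤ 0 := by omega
    rw [PySem.List.pyRange_one_eq_nil h1]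
    have hb : (n == 0) = false := by simp only [beq_eq_false_iff_ne, ne_eq]; omega
    rw [pv_A_unfold a n hb, PySem.List.pyRange_neg_one_eq_nil (by omega : n - 1 ≤ -1)]
    rfl
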